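-- pv_equiv track=rewrite | github.com/wilsonzlin/aero | scripts/ci/check-windows7-virtio-contract-consistency.py | strip_inf_comment_lines
-- ===== SOURCE A (Python) =====
-- def strip_inf_comment_lines(text: str) -> str:
--     """
--     Remove INF comments from `text`.
--
--     - Drops full-line comments (optional whitespace then ';').
--     - Strips inline comments using the same quote-aware rules as the other INF
--       helpers in this script (semicolons inside quoted strings are data).
--     """
--
--     out: list[str] = []
--     for raw in text.splitlines():
--         line = _strip_inf_inline_comment(raw).strip()
--         if not line:
--             continue
--         out.append(line)
--     return "\n".join(out)
--
-- def _strip_inf_inline_comment(line: str) -> str: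
--     """
--     Strip an INF inline comment.
--
--     INF comments start with `;` and run to end-of-line. Semicolons inside a quoted
--     string literal are treated as data, not a comment delimiter.
--     """
--
--     in_quotes = False
--     for i, ch in enumerate(line):
--         if ch == '"':
--             in_quotes = not in_quotes
--             continue
--         if ch == ";" and not in_quotes:
--             return line[:i]
--     return line
-- ===== SOURCE B (Python) =====
-- def _strip_inf_inline_comment(line: str) -> str:
--     # Split on '"': even-indexed segments are outside quotes, odd ones inside.
--     kept = []
--     for idx, seg in enumerate(line.split('"')):
--         if idx % 2 == 0 and ";" in seg:
--             kept.append(seg[:seg.index(";")])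
--             break
--         kept.append(seg)
--     return '"'.join(kept)
--
--
-- def strip_inf_comment_lines(text: str) -> str:
--     stripped = (_strip_inf_inline_comment(raw).strip() for raw in text.splitlines())
--     return "\n".join(line for line in stripped if line)
-- ===== Notes on version B (the rewrite author's own statement) =====
-- stated objective: faster
-- what changed: The inline-comment stripper splits each line on the double-quote character and scans only the even-indexed (outside-quotes) segments for the first semicolon, rejoining the kept segments, instead of a per-character scanner with an in_quotes flag; the outer loop becomes a comprehension over the stripped lines.
import Mathlib
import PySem

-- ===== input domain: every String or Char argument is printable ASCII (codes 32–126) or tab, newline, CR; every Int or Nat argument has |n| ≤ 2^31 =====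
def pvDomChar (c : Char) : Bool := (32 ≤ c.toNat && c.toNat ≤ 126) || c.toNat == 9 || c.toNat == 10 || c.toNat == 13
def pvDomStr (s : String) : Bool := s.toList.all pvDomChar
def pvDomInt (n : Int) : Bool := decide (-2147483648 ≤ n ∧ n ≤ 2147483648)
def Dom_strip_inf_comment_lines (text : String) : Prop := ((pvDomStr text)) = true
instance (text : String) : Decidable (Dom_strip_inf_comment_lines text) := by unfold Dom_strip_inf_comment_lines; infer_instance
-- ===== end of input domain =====

-- B replaces A's per-character scanner (in_quotes flag) by splitting each line on the quote
-- character and cutting the first outside-quotes segment containing a semicolon (measurably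
-- faster in CPython: the work moves into str.split/str.index).

-- ===== PORT A =====
-- _strip_inf_inline_comment's loop: `rest` is the unscanned suffix of `line`, `i` the current index, `inq` = in_quotes.
def pvAScan (line : List Char) (rest : List Char) (i : Int) (inq : Bool) : List Char :=
  match rest with
  | [] => line
  | c :: cs =>
    if c = '"' then pvAScan line cs (i + 1) (!inq)
    else if c = ';' && !inq then PySem.List.slice line none (some i)   -- line[:i]
    else pvAScan line cs (i + 1) inq

def pvAInline (line : List Char) : List Char := pvAScan line line 0 false

def strip_inf_comment_lines (text : String) : String :=
  String.ofList (PySem.Chars.join ['\n']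
    ((PySem.Chars.splitlines text.toList).foldl
      (fun out raw =>
        let line := PySem.Chars.strip (pvAInline raw)
        if line = [] then out else out ++ [line])
      []))

-- ===== PORT B =====
-- seg[:seg.index(';')]
def pvCutSeg (s : List Char) : List Char :=
  PySem.List.slice s none (some (PySem.Chars.find s [';']))

-- the loop over enumerate(line.split('"')); `even` = (idx % 2 == 0), `kept` the accumulator
def pvBGo (segs : List (List Char)) (even : Bool) (kept : List (List Char)) : List (List Char) :=
  match segs with
  | [] => kept
  | s :: rest =>
    if even && PySem.Chars.isIn [';'] s then kept ++ [pvCutSeg s]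
    else pvBGo rest (!even) (kept ++ [s])

def pvBInline (line : List Char) : List Char :=
  PySem.Chars.join ['"'] (pvBGo (PySem.Chars.splitOn line ['"']) true [])

def strip_inf_comment_lines_alt (text : String) : String :=
  String.ofList (PySem.Chars.join ['\n']
    (((PySem.Chars.splitlines text.toList).map
        (fun raw => PySem.Chars.strip (pvBInline raw))).filter (· ≠ [])))

-- ===== PRECONDITION & SPEC =====
def Spec_strip_inf_comment_lines (text : String) (out : String) : Prop := out = strip_inf_comment_lines_alt text
instance (text : String) (out : String) : Decidable (Spec_strip_inf_comment_lines text out) := by unfold Spec_strip_inf_comment_lines; infer_instance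

-- ===== CLAIM (what is proved, stated in full; the proofs are below) =====
def Claim_equal_strip_inf_comment_lines : Prop := ∀ (text : String), Dom_strip_inf_comment_lines text → Spec_strip_inf_comment_lines text (strip_inf_comment_lines text)

-- ===== LEMMAS AND PROOFS =====

-- `F cs inq`: the prefix of `cs` kept if the scan started in state `inq` hits an unquoted ';' (none otherwise).
def pvF (cs : List Char) (inq : Bool) : Option (List Char) :=
  match cs with
  | [] => none
  | c :: rest =>
    if c = '"' then (pvF rest (!inq)).map (c :: ·)
    else if c = ';' && !inq then some []
    else (pvF rest inq).map (c :: ·)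

-- structural single-quote-separator split (reference shape of splitOn line ['"'])
def pvSplit (cs : List Char) : List (List Char) :=
  match cs with
  | [] => [[]]
  | c :: rest =>
    if c = '"' then [] :: pvSplit rest
    else match pvSplit rest with
      | [] => [[c]]
      | p :: ps => (c :: p) :: ps

theorem pvSplit_ne_nil (cs : List Char) : pvSplit cs ≠ [] := by
  cases cs with
  | nil => simp [pvSplit]
  | cons c rest =>
    by_cases h : c = '"'
    · simp [pvSplit, h]
    · simp only [pvSplit, if_neg h]
      split <;> simp

theorem pvSplit_cons_ne (c : Char) (rest : List Char) (p : List Char) (ps : List (List Char))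
    (hc : c ≠ '"') (h : pvSplit rest = p :: ps) : pvSplit (c :: rest) = (c :: p) :: ps := by
  simp [pvSplit, if_neg hc, h]

theorem splitOn_go_quote (l : List Char) : ∀ (fuel : Nat) (cur : List Char) (acc : List (List Char)),
    l.length ≤ fuel →
    PySem.Chars.splitOn.go ['"'] fuel l cur acc =
      acc.reverse ++ (match pvSplit l with
        | [] => []
        | p :: ps => (cur.reverse ++ p) :: ps) := by
  induction l with
  | nil =>
    intro fuel cur acc _
    cases fuel <;> simp [PySem.Chars.splitOn.go, pvSplit]
  | cons c rest ih =>
    intro fuel cur acc hfuel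
    cases fuel with
    | zero => simp at hfuel
    | succ fuel =>
      have hfuel' : rest.length ≤ fuel := by simpa using Nat.le_of_succ_le_succ hfuel
      by_cases hc : c = '"'
      · subst hc
        rw [show PySem.Chars.splitOn.go ['"'] (fuel+1) ('"'::rest) cur acc
              = PySem.Chars.splitOn.go ['"'] fuel rest [] (cur.reverse :: acc) by
            simp [PySem.Chars.splitOn.go, List.isPrefixOf]]
        rw [ih fuel [] (cur.reverse :: acc) hfuel']
        cases h : pvSplit rest with
        | nil => exact absurd h (pvSplit_ne_nil rest)
        | cons p ps => simp [pvSplit, h]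
      · rw [show PySem.Chars.splitOn.go ['"'] (fuel+1) (c::rest) cur acc
              = PySem.Chars.splitOn.go ['"'] fuel rest (c :: cur) acc by
            simp [PySem.Chars.splitOn.go, List.isPrefixOf, Ne.symm hc]]
        rw [ih fuel (c :: cur) acc hfuel']
        cases h : pvSplit rest with
        | nil => exact absurd h (pvSplit_ne_nil rest)
        | cons p ps => simp [pvSplit_cons_ne c rest p ps hc h]

theorem splitOn_eq_pvSplit (l : List Char) : PySem.Chars.splitOn l ['"'] = pvSplit l := by
  rw [PySem.Chars.splitOn, splitOn_go_quote l (l.length + 1) [] [] (Nat.le_succ _)]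
  cases h : pvSplit l with
  | nil => exact absurd h (pvSplit_ne_nil l)
  | cons p ps => simp

-- find.go facts for the single-character needle [';']
theorem find_go_shift (t : List Char) : ∀ k : Nat, ';' ∈ t →
    PySem.Chars.find.go [';'] t k = k + PySem.Chars.find.go [';'] t 0 := by
  induction t with
  | nil => intro k h; simp at h
  | cons c rest ih =>
    intro k h
    by_cases hc : c = ';'
    · subst hc
      simp [PySem.Chars.find.go, List.isPrefixOf]
    · have hm : ';' ∈ rest := by
        rcases List.mem_cons.mp h with h1 | h1
        · exact absurd h1.symm hc
        · exact h1
      have hp : ([';'] : List Char).isPrefixOf (c :: rest) = false := by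
        simp [List.isPrefixOf, Ne.symm hc]
      simp only [PySem.Chars.find.go, hp, Bool.false_eq_true, if_false]
      rw [ih (k + 1) hm, ih 1 hm]
      push_cast; ring

theorem find_cons_ne (c : Char) (rest : List Char) (hc : c ≠ ';') (hm : ';' ∈ rest) :
    PySem.Chars.find (c :: rest) [';'] = 1 + PySem.Chars.find rest [';'] := by
  have hp : ([';'] : List Char).isPrefixOf (c :: rest) = false := by
    simp [List.isPrefixOf, Ne.symm hc]
  simp only [PySem.Chars.find, PySem.Chars.find.go, hp, Bool.false_eq_true, if_false]
  rw [find_go_shift rest 1 hm]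
  push_cast; ring

theorem find_nonneg_of_mem (t : List Char) (h : ';' ∈ t) : 0 ≤ PySem.Chars.find t [';'] := by
  apply (PySem.Chars.find_nonneg_iff t [';']).mpr
  rcases List.mem_iff_append.mp h with ⟨s, u, rfl⟩
  exact ⟨s, u, by simp⟩

theorem pvCutSeg_cons (c : Char) (rest : List Char) (h : ';' ∈ c :: rest) :
    pvCutSeg (c :: rest) = if c = ';' then [] else c :: pvCutSeg rest := by
  by_cases hc : c = ';'
  · subst hc
    have : PySem.Chars.find (';' :: rest) [';'] = 0 := by
      simp [PySem.Chars.find, PySem.Chars.find.go, List.isPrefixOf]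
    simp [pvCutSeg, this, PySem.List.slice]
  · have hm : ';' ∈ rest := by
      rcases List.mem_cons.mp h with h1 | h1
      · exact absurd h1.symm hc
      · exact h1
    have hf := find_cons_ne c rest hc hm
    obtain ⟨n, hn⟩ : ∃ n : Nat, PySem.Chars.find rest [';'] = (n : Int) :=
      ⟨(PySem.Chars.find rest [';']).toNat, (Int.toNat_of_nonneg (find_nonneg_of_mem rest hm)).symm⟩
    simp only [pvCutSeg, hf, hn, if_neg hc]
    rw [show (1 + (n : Int)) = ((n + 1 : Nat) : Int) by push_cast; ring]
    rw [PySem.List.slice_to_natCast, PySem.List.slice_to_natCast]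
    simp [List.take_succ_cons]

theorem isIn_semi (s : List Char) : PySem.Chars.isIn [';'] s = true ↔ ';' ∈ s := by
  rw [PySem.Chars.isIn_iff_infix]
  constructor
  · rintro ⟨p, q, rfl⟩; simp
  · intro h
    rcases List.mem_iff_append.mp h with ⟨p, q, rfl⟩
    exact ⟨p, q, by simp⟩

theorem isIn_semi_false (s : List Char) (h : ';' ∉ s) : PySem.Chars.isIn [';'] s = false := by
  cases hh : PySem.Chars.isIn [';'] s
  · rfl
  · exact absurd ((isIn_semi s).mp hh) h

-- A's scanner computes pvF
theorem pvAScan_eq_pvF (rest : List Char) : ∀ (pre line : List Char) (inq : Bool),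
    line = pre ++ rest →
    pvAScan line rest (pre.length : Int) inq =
      (match pvF rest inq with
        | some p => pre ++ p
        | none => line) := by
  induction rest with
  | nil => intro pre line inq h; simp [pvAScan, pvF]
  | cons c cs ih =>
    intro pre line inq h
    by_cases hc : c = '"'
    · subst hc
      rw [show pvAScan line ('"' :: cs) (pre.length : Int) inq
            = pvAScan line cs ((pre.length : Int) + 1) (!inq) by simp [pvAScan]]
      rw [show ((pre.length : Int) + 1) = (((pre ++ ['"']).length : Nat) : Int) by simp]
      rw [ih (pre ++ ['"']) line (!inq) (by simp [h])]
      simp only [pvF, if_pos rfl]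
      cases pvF cs (!inq) <;> simp
    · by_cases hsc : c = ';' ∧ inq = false
      · obtain ⟨rfl, rfl⟩ := hsc
        rw [show pvAScan line (';' :: cs) (pre.length : Int) false
              = PySem.List.slice line none (some (pre.length : Int)) by
            simp [pvAScan]]
        rw [PySem.List.slice_to_natCast]
        simp [pvF, h]
      · have hnot : (c = ';' && !inq) = false := by
          cases inq <;> simp_all
        rw [show pvAScan line (c :: cs) (pre.length : Int) inq
              = pvAScan line cs ((pre.length : Int) + 1) inq by
            simp [pvAScan, hc, hnot]]
        rw [show ((pre.length : Int) + 1) = (((pre ++ [c]).length : Nat) : Int) by simp]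
        rw [ih (pre ++ [c]) line inq (by simp [h])]
        rw [show pvF (c :: cs) inq = (pvF cs inq).map (c :: ·) by simp [pvF, hc, hnot]]
        cases pvF cs inq <;> simp

theorem pvAInline_eq_pvF (line : List Char) :
    pvAInline line = (match pvF line false with | some p => p | none => line) := by
  have := pvAScan_eq_pvF line [] line false (by simp)
  simpa [pvAInline] using this

-- pvBGo only appends to its accumulator
theorem pvBGo_acc (segs : List (List Char)) : ∀ (even : Bool) (kept : List (List Char)),
    pvBGo segs even kept = kept ++ pvBGo segs even [] := by
  induction segs with
  | nil => intro e k; simp [pvBGo]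
  | cons s rest ih =>
    intro e k
    by_cases h : (e && PySem.Chars.isIn [';'] s) = true
    · simp [pvBGo, h]
    · simp only [pvBGo, h, Bool.false_eq_true, if_false, List.nil_append]
      rw [ih (!e) (k ++ [s]), ih (!e) [s]]
      simp

theorem pvBGo_ne_nil (segs : List (List Char)) (e : Bool) (h : segs ≠ []) :
    pvBGo segs e [] ≠ [] := by
  cases segs with
  | nil => exact absurd rfl h
  | cons s rest =>
    by_cases hh : (e && PySem.Chars.isIn [';'] s) = true
    · simp [pvBGo, hh]
    · simp only [pvBGo, hh, Bool.false_eq_true, if_false, List.nil_append]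
      rw [pvBGo_acc rest (!e) [s]]
      simp

theorem join_quote_cons (c : Char) (p : List Char) (X : List (List Char)) :
    PySem.Chars.join ['"'] ((c :: p) :: X) = c :: PySem.Chars.join ['"'] (p :: X) := by
  cases X with
  | nil => simp [PySem.Chars.join_singleton]
  | cons y ys => simp [PySem.Chars.join_cons_cons]

theorem pvBGo_pvSplit_cons (c : Char) (p : List Char) (ps : List (List Char)) (ev : Bool)
    (hc : ¬(ev = true ∧ c = ';')) :
    PySem.Chars.join ['"'] (pvBGo ((c :: p) :: ps) ev []) =
      c :: PySem.Chars.join ['"'] (pvBGo (p :: ps) ev []) := by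
  by_cases hev : ev = true
  · subst hev
    by_cases hin : PySem.Chars.isIn [';'] (c :: p) = true
    · have hmem : ';' ∈ c :: p := (isIn_semi _).mp hin
      have hcc : c ≠ ';' := fun h => hc ⟨rfl, h⟩
      have hmp : ';' ∈ p := by
        rcases List.mem_cons.mp hmem with h1 | h1
        · exact absurd h1.symm hcc
        · exact h1
      have hinp : PySem.Chars.isIn [';'] p = true := (isIn_semi _).mpr hmp
      simp only [pvBGo, hin, hinp, Bool.true_and, if_pos, List.nil_append]
      rw [pvCutSeg_cons c p hmem, if_neg hcc]
      simp [PySem.Chars.join_singleton]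
    · have hmem : ';' ∉ c :: p := fun h => hin ((isIn_semi _).mpr h)
      have hinp : PySem.Chars.isIn [';'] p = false :=
        isIn_semi_false p (fun h => hmem (by simp [h]))
      have hin' : PySem.Chars.isIn [';'] (c :: p) = false := by
        cases hx : PySem.Chars.isIn [';'] (c :: p)
        · rfl
        · exact absurd hx hin
      simp only [pvBGo, hin', hinp, Bool.and_false, Bool.false_eq_true, if_false,
        List.nil_append]
      rw [pvBGo_acc ps (!true) [c :: p], pvBGo_acc ps (!true) [p]]
      exact join_quote_cons c p _
  · have hev' : ev = false := by cases ev; rfl; exact absurd rfl hev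
    subst hev'
    simp only [pvBGo, Bool.false_and, Bool.false_eq_true, if_false, List.nil_append]
    rw [pvBGo_acc ps (!false) [c :: p], pvBGo_acc ps (!false) [p]]
    exact join_quote_cons c p _

theorem pvBGo_pvSplit (cs : List Char) : ∀ inq : Bool,
    PySem.Chars.join ['"'] (pvBGo (pvSplit cs) (!inq) []) =
      (match pvF cs inq with | some p => p | none => cs) := by
  induction cs with
  | nil => intro inq; simp [pvSplit, pvBGo, pvF, PySem.Chars.join_singleton, isIn_semi_false ([] : List Char) (by simp)]
  | cons c rest ih =>
    intro inq
    by_cases hc : c = '"'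
    · subst hc
      rw [show pvSplit ('"' :: rest) = [] :: pvSplit rest by simp [pvSplit]]
      have hinnil : PySem.Chars.isIn [';'] ([] : List Char) = false :=
        isIn_semi_false [] (by simp)
      simp only [pvBGo, hinnil, Bool.and_false, Bool.false_eq_true, if_false, List.nil_append]
      rw [pvBGo_acc (pvSplit rest) (!(!inq)) [[]]]
      have hne : pvBGo (pvSplit rest) (!(!inq)) [] ≠ [] :=
        pvBGo_ne_nil _ _ (pvSplit_ne_nil rest)
      rw [show PySem.Chars.join ['"'] ([[]] ++ pvBGo (pvSplit rest) (!(!inq)) [])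
            = '"' :: PySem.Chars.join ['"'] (pvBGo (pvSplit rest) (!(!inq)) []) by
          cases hx : pvBGo (pvSplit rest) (!(!inq)) [] with
          | nil => exact absurd hx hne
          | cons y ys => simp [PySem.Chars.join_cons_cons]]
      rw [ih (!inq)]
      simp only [pvF, if_pos rfl]
      cases pvF rest (!inq) <;> simp
    · obtain ⟨p, ps, hps⟩ : ∃ p ps, pvSplit rest = p :: ps := by
        cases h : pvSplit rest with
        | nil => exact absurd h (pvSplit_ne_nil rest)
        | cons p ps => exact ⟨p, ps, rfl⟩
      rw [pvSplit_cons_ne c rest p ps hc hps]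
      by_cases hsc : c = ';' ∧ inq = false
      · obtain ⟨rfl, rfl⟩ := hsc
        have hmem : ';' ∈ (';' :: p) := by simp
        have hin : PySem.Chars.isIn [';'] (';' :: p) = true := (isIn_semi _).mpr hmem
        simp only [pvBGo, Bool.not_false, Bool.true_and, hin, if_pos, List.nil_append]
        rw [pvCutSeg_cons ';' p hmem, if_pos rfl]
        simp [pvF, PySem.Chars.join_singleton]
      · have hcond : ¬((!inq) = true ∧ c = ';') := by
          rintro ⟨h1, rfl⟩
          exact hsc ⟨rfl, by cases inq; rfl; simp at h1⟩
        rw [pvBGo_pvSplit_cons c p ps (!inq) hcond]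
        rw [← hps, ih inq]
        rw [show pvF (c :: rest) inq = (pvF rest inq).map (c :: ·) by
          have hnot : (c = ';' && !inq) = false := by
            rcases Decidable.em (c = ';') with h1 | h1
            · subst h1
              cases inq
              · exact absurd ⟨rfl, rfl⟩ hsc
              · simp
            · simp [h1]
          simp [pvF, hc, hnot]]
        cases pvF rest inq <;> simp

theorem pvInline_eq (line : List Char) : pvAInline line = pvBInline line := by
  rw [pvAInline_eq_pvF, pvBInline, splitOn_eq_pvSplit]
  have := pvBGo_pvSplit line false
  simpa using this.symm

-- ===== VERDICT (by name: the statement is the Claim_ definition above) =====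
theorem strip_inf_comment_lines_spec : Claim_equal_strip_inf_comment_lines := by
  intro text _
  unfold Spec_strip_inf_comment_lines strip_inf_comment_lines strip_inf_comment_lines_alt
  congr 2
  rw [PySem.List.foldl_congr_mem _ _
        (fun out raw =>
          if PySem.Chars.strip (pvBInline raw) ≠ [] then out ++ [PySem.Chars.strip (pvBInline raw)] else out)
        []
        (by
          intro acc x _
          simp only [pvInline_eq]
          by_cases h : PySem.Chars.strip (pvBInline x) = [] <;> simp [h])]
  rw [show (fun out raw =>
        if PySem.Chars.strip (pvBInline raw) ≠ [] then out ++ [PySem.Chars.strip (pvBInline raw)] else out)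
      = (fun (out : List (List Char)) raw =>
        if (decide (PySem.Chars.strip (pvBInline raw) ≠ [])) = true then out ++ [PySem.Chars.strip (pvBInline raw)] else out) by
    funext out raw; simp]
  rw [PySem.List.foldl_append_if (fun raw => decide (PySem.Chars.strip (pvBInline raw) ≠ []))
        (fun raw => PySem.Chars.strip (pvBInline raw))]
  simp [List.filter_map, Function.comp_def]
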